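-- pv_equiv track=rewrite | github.com/Arthur742Ramos/RegularInducedSubgraph | search_structured_q4.py | first_regular_induced_subset
-- ===== SOURCE A (Python) =====
-- def degree_on_mask(adj: list[int], vertex: int, subset_mask: int) -> int:
--     return (adj[vertex] & subset_mask).bit_count()
--
-- def first_regular_induced_subset(
--     adj: list[int], candidates: list[tuple[int, tuple[int, ...]]]
-- ) -> tuple[int, ...] | None:
--     for subset_mask, subset_vertices in candidates:
--         target_degree = degree_on_mask(adj, subset_vertices[0], subset_mask)
--         for vertex in subset_vertices[1:]:
--             if degree_on_mask(adj, vertex, subset_mask) != target_degree: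
--                 break
--         else:
--             return subset_vertices
--     return None
-- ===== SOURCE B (Python) =====
-- def first_regular_induced_subset(
--     adj: list[int], candidates: list[tuple[int, tuple[int, ...]]]
-- ) -> tuple[int, ...] | None:
--     for subset_mask, subset_vertices in candidates:
--         degs = [(adj[v] & subset_mask).bit_count() for v in subset_vertices]
--         # all degrees are equal iff the variance is zero: n * sum(d^2) == (sum d)^2
--         if len(degs) * sum(d * d for d in degs) == sum(degs) ** 2:
--             return subset_vertices
--     return None
-- ===== Notes on version B (the rewrite author's own statement) =====
-- stated objective: alternative
-- what changed: Replaces A's compare-each-remaining-degree-to-the-first streaming loop by a purely arithmetic uniformity test: collect all degrees of the candidate and check the variance-zero identity n*sum(d^2) == (sum d)^2 (Cauchy-Schwarz equality), with no reference element and no comparisons.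
-- outside the precondition, e.g. on first_regular_induced_subset([3, 0], [(3, (0, 1, 5)), (3, (0,))]): A returns (0,), B raises IndexError; on first_regular_induced_subset([1], [(1, ())]): A raises IndexError, B returns ()
import Mathlib
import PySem

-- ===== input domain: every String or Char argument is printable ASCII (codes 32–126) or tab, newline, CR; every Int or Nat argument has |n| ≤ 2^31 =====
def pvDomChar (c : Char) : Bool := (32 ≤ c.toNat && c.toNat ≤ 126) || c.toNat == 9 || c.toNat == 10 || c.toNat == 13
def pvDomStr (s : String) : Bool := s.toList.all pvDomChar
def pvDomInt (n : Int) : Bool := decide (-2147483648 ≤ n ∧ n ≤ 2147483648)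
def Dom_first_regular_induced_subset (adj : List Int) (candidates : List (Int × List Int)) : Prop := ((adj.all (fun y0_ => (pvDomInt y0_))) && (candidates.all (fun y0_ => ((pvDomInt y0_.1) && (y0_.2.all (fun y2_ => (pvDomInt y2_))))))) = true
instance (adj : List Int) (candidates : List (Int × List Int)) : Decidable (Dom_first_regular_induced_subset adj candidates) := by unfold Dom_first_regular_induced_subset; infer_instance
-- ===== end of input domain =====

-- B tests each candidate's regularity by the arithmetic variance-zero identity
-- n*Σd² = (Σd)² over all degrees, instead of A's compare-to-first streaming loop; same cost.


-- ===== PORT A =====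
-- helper of A: degree_on_mask = (adj[vertex] & subset_mask).bit_count()
def degree_on_mask (adj : List Int) (vertex : Int) (subset_mask : Int) : Int :=
  (PySem.Int.bitCount (PySem.Int.band (PySem.List.pyGetD adj vertex 0) subset_mask) : Int)

-- A's inner 'for … break / else' loop: true iff no remaining vertex breaks
def pvInnerA (adj : List Int) (subset_mask : Int) (target_degree : Int) : List Int → Bool
  | [] => true
  | v :: vs =>
    if degree_on_mask adj v subset_mask ≠ target_degree then false
    else pvInnerA adj subset_mask target_degree vs

def first_regular_induced_subset (adj : List Int) (candidates : List (Int × List Int)) : Option (List Int) :=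
  match candidates with
  | [] => none
  | (subset_mask, subset_vertices) :: rest =>
    let target_degree := degree_on_mask adj (PySem.List.pyGetD subset_vertices 0 0) subset_mask
    if pvInnerA adj subset_mask target_degree (PySem.List.slice subset_vertices (some 1) none) then
      some subset_vertices
    else first_regular_induced_subset adj rest

-- ===== PORT B =====
def first_regular_induced_subset_alt (adj : List Int) (candidates : List (Int × List Int)) : Option (List Int) :=
  match candidates with
  | [] => none
  | (subset_mask, subset_vertices) :: rest =>
    let degs := subset_vertices.map
      (fun v => (PySem.Int.bitCount (PySem.Int.band (PySem.List.pyGetD adj v 0) subset_mask) : Int))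
    if (degs.length : Int) * (degs.map (fun d => d * d)).sum = degs.sum ^ 2 then
      some subset_vertices
    else first_regular_induced_subset_alt adj rest

-- ===== PRECONDITION & SPEC =====
-- a candidate is well-formed: nonempty vertex tuple, all vertex indices in range of adj
def pvWf (adj : List Int) (c : Int × List Int) : Prop :=
  c.2 ≠ [] ∧ ∀ v ∈ c.2, PySem.Raise.InRange adj.length v
-- a candidate is regular: all its vertices have the same degree on its mask
def pvReg (adj : List Int) (c : Int × List Int) : Prop :=
  ∀ u ∈ c.2, ∀ v ∈ c.2, degree_on_mask adj u c.1 = degree_on_mask adj v c.1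
-- Pre_ : every candidate A actually reaches (all earlier ones well-formed and not regular)
-- is itself well-formed; this still excludes some inputs on which A returns: a reached
-- non-regular candidate may contain an out-of-range vertex after the vertex where A's
-- inner loop breaks, which A never touches (see the cites in the claim).
def Pre_first_regular_induced_subset (adj : List Int) (candidates : List (Int × List Int)) : Prop :=
  ∀ i < candidates.length,
    (∀ j < i, pvWf adj (candidates.getD j (0, [])) ∧ ¬ pvReg adj (candidates.getD j (0, []))) →
    pvWf adj (candidates.getD i (0, []))
instance (adj : List Int) (candidates : List (Int × List Int)) : Decidable (Pre_first_regular_induced_subset adj candidates) := by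
  unfold Pre_first_regular_induced_subset pvWf pvReg; infer_instance
def pvWitness_first_regular_induced_subset : List Int × (List (Int × List Int)) := ([1, 2], [(3, [0, 1])])

def Spec_first_regular_induced_subset (adj : List Int) (candidates : List (Int × List Int)) (out : Option (List Int)) : Prop := out = first_regular_induced_subset_alt adj candidates
instance (adj : List Int) (candidates : List (Int × List Int)) (out : Option (List Int)) : Decidable (Spec_first_regular_induced_subset adj candidates out) := by unfold Spec_first_regular_induced_subset; infer_instance

-- ===== CLAIM (what is proved, stated in full; the proofs are below) =====
def Claim_equal_first_regular_induced_subset : Prop := ∀ (adj : List Int) (candidates : List (Int × List Int)), Dom_first_regular_induced_subset adj candidates → Pre_first_regular_induced_subset adj candidates → Spec_first_regular_induced_subset adj candidates (first_regular_induced_subset adj candidates)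

-- ===== LEMMAS AND PROOFS =====

-- sum of the squares (a - y)^2 over the tail, in expanded form
theorem sumsq_expand (a : Int) (t : List Int) :
    (t.map (fun y => (a - y) * (a - y))).sum
      = (t.length : Int) * (a * a) - 2 * a * t.sum + (t.map (fun d => d * d)).sum := by
  induction t with
  | nil => simp
  | cons y t ih =>
    simp only [List.map_cons, List.sum_cons, List.length_cons, ih]
    push_cast
    ring

theorem sumsq_nonneg (a : Int) (t : List Int) :
    0 ≤ (t.map (fun y => (a - y) * (a - y))).sum :=
  List.sum_nonneg (by rintro x hx; simp only [List.mem_map] at hx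
                      obtain ⟨y, _, rfl⟩ := hx; exact mul_self_nonneg _)

theorem sumsq_eq_zero_iff (a : Int) (t : List Int) :
    (t.map (fun y => (a - y) * (a - y))).sum = 0 ↔ ∀ y ∈ t, y = a := by
  induction t with
  | nil => simp
  | cons y t ih =>
    simp only [List.map_cons, List.sum_cons, List.mem_cons, forall_eq_or_imp]
    constructor
    · intro h
      have h1 := mul_self_nonneg (a - y)
      have h2 := sumsq_nonneg a t
      have hy : (a - y) * (a - y) = 0 := by omega
      have hy' : y = a := by nlinarith [sq_nonneg (a - y)]
      exact ⟨hy', ih.mp (by omega)⟩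
    · rintro ⟨rfl, h⟩
      simp [ih.mpr h]

-- variance-zero characterization: n*Σd² ≥ (Σd)², with equality iff all elements are equal
theorem var_main (l : List Int) :
    (l.sum) ^ 2 ≤ (l.length : Int) * (l.map (fun d => d * d)).sum ∧
    ((l.length : Int) * (l.map (fun d => d * d)).sum = (l.sum) ^ 2 ↔
      ∀ x ∈ l, ∀ y ∈ l, x = y) := by
  induction l with
  | nil => simp
  | cons a t ih =>
    obtain ⟨hle, hiff⟩ := ih
    have hT := sumsq_expand a t
    have hTnn := sumsq_nonneg a t
    have hid : ((a :: t).length : Int) * ((a :: t).map (fun d => d * d)).sum - ((a :: t).sum) ^ 2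
        = ((t.length : Int) * (t.map (fun d => d * d)).sum - (t.sum) ^ 2)
          + (t.map (fun y => (a - y) * (a - y))).sum := by
      simp only [List.map_cons, List.sum_cons, List.length_cons, hT]
      push_cast
      ring
    constructor
    · omega
    · constructor
      · intro h
        have hz1 : (t.length : Int) * (t.map (fun d => d * d)).sum = (t.sum) ^ 2 := by omega
        have hz2 : (t.map (fun y => (a - y) * (a - y))).sum = 0 := by omega
        have hall := (sumsq_eq_zero_iff a t).mp hz2
        have key : ∀ z ∈ a :: t, z = a := by
          intro z hz
          rcases List.mem_cons.mp hz with hz | hz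
          · exact hz
          · exact hall z hz
        intro x hx y hy
        rw [key x hx, key y hy]
      · intro h
        have hz2 : (t.map (fun y => (a - y) * (a - y))).sum = 0 :=
          (sumsq_eq_zero_iff a t).mpr
            (fun y hy => h y (List.mem_cons_of_mem a hy) a (List.mem_cons_self))
        have hz1 : (t.length : Int) * (t.map (fun d => d * d)).sum = (t.sum) ^ 2 :=
          hiff.mpr (fun x hx y hy =>
            h x (List.mem_cons_of_mem a hx) y (List.mem_cons_of_mem a hy))
        omega

theorem pvInnerA_eq_true_iff (adj : List Int) (m t : Int) (vs : List Int) :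
    pvInnerA adj m t vs = true ↔ ∀ v ∈ vs, degree_on_mask adj v m = t := by
  induction vs with
  | nil => simp [pvInnerA]
  | cons v vs ih =>
    by_cases h : degree_on_mask adj v m = t
    · simp [pvInnerA, h, ih]
    · simp only [pvInnerA, if_pos h, Bool.false_eq_true, false_iff]
      intro hall
      exact h (hall v (by simp))

-- A's inner-loop condition on a nonempty vertex list is exactly regularity
theorem reg_cons_iff (adj : List Int) (m v0 : Int) (vt : List Int) :
    pvReg adj (m, v0 :: vt) ↔ ∀ v ∈ vt, degree_on_mask adj v m = degree_on_mask adj v0 m := by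
  unfold pvReg
  constructor
  · intro h v hv
    exact h v (List.mem_cons_of_mem _ hv) v0 (List.mem_cons_self)
  · intro h u hu v hv
    have key : ∀ z ∈ v0 :: vt, degree_on_mask adj z m = degree_on_mask adj v0 m := by
      intro z hz
      rcases List.mem_cons.mp hz with rfl | hz
      · rfl
      · exact h z hz
    rw [key u hu, key v hv]

theorem acond_iff (adj : List Int) (m v0 : Int) (vt : List Int) :
    (pvInnerA adj m (degree_on_mask adj v0 m) vt = true) ↔ pvReg adj (m, v0 :: vt) := by
  rw [pvInnerA_eq_true_iff, reg_cons_iff]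

-- B's variance-zero condition is exactly regularity
theorem bcond_iff (adj : List Int) (m : Int) (verts : List Int) :
    (let degs := verts.map (fun v => degree_on_mask adj v m)
     (degs.length : Int) * (degs.map (fun d => d * d)).sum = degs.sum ^ 2) ↔
      pvReg adj (m, verts) := by
  rw [(var_main (verts.map (fun v => degree_on_mask adj v m))).2]
  unfold pvReg
  constructor
  · intro h u hu v hv
    exact h _ (List.mem_map_of_mem hu) _ (List.mem_map_of_mem hv)
  · intro h x hx y hy
    obtain ⟨u, hu, rfl⟩ := List.mem_map.mp hx
    obtain ⟨v, hv, rfl⟩ := List.mem_map.mp hy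
    exact h u hu v hv

theorem pre_head (adj : List Int) (c : Int × List Int) (rest : List (Int × List Int))
    (h : Pre_first_regular_induced_subset adj (c :: rest)) : pvWf adj c := by
  have := h 0 (by simp) (by omega)
  simpa using this

theorem pre_tail (adj : List Int) (c : Int × List Int) (rest : List (Int × List Int))
    (h : Pre_first_regular_induced_subset adj (c :: rest))
    (hwf : pvWf adj c) (hnr : ¬ pvReg adj c) :
    Pre_first_regular_induced_subset adj rest := by
  intro i hi hj
  have := h (i + 1) (by simpa using Nat.succ_lt_succ hi) ?_
  · simpa using this
  · intro j hj'
    match j with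
    | 0 => simpa using ⟨hwf, hnr⟩
    | Nat.succ k =>
      have hk : k < i := by omega
      simpa using hj k hk

theorem ports_eq (adj : List Int) (candidates : List (Int × List Int)) :
    Pre_first_regular_induced_subset adj candidates →
    first_regular_induced_subset adj candidates = first_regular_induced_subset_alt adj candidates := by
  induction candidates with
  | nil => intro _; rfl
  | cons c rest ih =>
    intro hpre
    obtain ⟨m, verts⟩ := c
    have hwf := pre_head adj (m, verts) rest hpre
    have hne : verts ≠ [] := hwf.1
    obtain ⟨v0, vt, rfl⟩ := List.exists_cons_of_ne_nil hne
    simp only [first_regular_induced_subset, first_regular_induced_subset_alt,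
      PySem.List.slice_from_one, List.tail_cons, PySem.List.pyGetD_zero_cons]
    rw [show (fun v => (PySem.Int.bitCount (PySem.Int.band (PySem.List.pyGetD adj v 0) m) : Int))
          = fun v => degree_on_mask adj v m from rfl]
    by_cases hreg : pvReg adj (m, v0 :: vt)
    · rw [if_pos ((acond_iff adj m v0 vt).mpr hreg), if_pos ((bcond_iff adj m (v0 :: vt)).mpr hreg)]
    · rw [if_neg (by simpa using fun h => hreg ((acond_iff adj m v0 vt).mp h)),
          if_neg (fun h => hreg ((bcond_iff adj m (v0 :: vt)).mp h))]
      exact ih (pre_tail adj (m, v0 :: vt) rest hpre hwf hreg)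

-- ===== VERDICT (by name: the statement is the Claim_ definition above) =====
theorem first_regular_induced_subset_spec : Claim_equal_first_regular_induced_subset := by
  intro adj candidates _ hpre
  unfold Spec_first_regular_induced_subset
  exact ports_eq adj candidates hpre
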